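-- pv_equiv track=rewrite | github.com/WiseWorkforce/AoC2024 | Day 15/aoc.py | expand_warehouse
-- ===== SOURCE A (Python) =====
-- def expand_warehouse(m):
--     new_chrs = {"#" : "##", "O" : "[]", "." : "..", "@" : "@."}
--     new_m  = []
--     for i, r in enumerate(m):
--         new_row = []
--         for j, c in enumerate(r):
--             new_row += new_chrs[c]
--         new_m.append(new_row)
--     new_m = [''.join(x) for x in new_m]
--     for i,r in enumerate(new_m):
--         for j,c in enumerate(r):
--             if c == "@":
--                 start = (i,j)
--     return new_m, start
-- ===== SOURCE B (Python) =====
-- def expand_warehouse(m):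
--     new_chrs = {"#": "##", "O": "[]", ".": "..", "@": "@."}
--     new_m = [''.join(new_chrs[c] for c in r) for r in m]
--     for i, r in reversed(list(enumerate(m))):
--         j = r.rfind('@')
--         if j != -1:
--             return new_m, (i, 2 * j)
--     raise ValueError("no robot '@' in warehouse map")
-- ===== Notes on version B (the rewrite author's own statement) =====
-- stated objective: alternative
-- what changed: B builds each expanded row in a single join-of-generator comprehension instead of A's nested index loops appending char lists plus a separate join pass, and finds '@' by scanning the ORIGINAL rows back-to-front with str.rfind and an early return (column obtained as 2*j in closed form) instead of A's second full nested scan of the doubled grid with overwrite.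
import Mathlib
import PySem

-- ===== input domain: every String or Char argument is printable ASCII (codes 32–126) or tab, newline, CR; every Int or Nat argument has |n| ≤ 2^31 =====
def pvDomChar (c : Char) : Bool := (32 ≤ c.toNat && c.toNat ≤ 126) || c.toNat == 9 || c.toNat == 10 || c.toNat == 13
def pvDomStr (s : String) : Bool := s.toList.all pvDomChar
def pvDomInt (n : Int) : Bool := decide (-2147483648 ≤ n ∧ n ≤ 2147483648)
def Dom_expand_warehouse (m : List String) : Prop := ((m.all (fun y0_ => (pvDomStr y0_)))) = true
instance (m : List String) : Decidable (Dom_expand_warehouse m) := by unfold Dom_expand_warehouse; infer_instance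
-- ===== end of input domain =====

-- B expands each row in one join-of-generator comprehension and finds '@' by a back-to-front
-- early-exit scan of the ORIGINAL rows with str.rfind (column 2*j in closed form) instead of A's
-- second full nested scan of the doubled grid; equal values on Pre_ (alternative decomposition, no speed claim).

-- ===== PORT A =====
def pvNewChrs : PySem.Dict Char String :=
  PySem.Dict.ofList [('#', "##"), ('O', "[]"), ('.', ".."), ('@', "@.")]

-- inner loop: new_row += new_chrs[c]  (KeyError on a char outside the dict is excluded by Pre_)
def pvBuildRow (r : String) : List Char :=
  (PySem.List.enumerate r.toList).foldl
    (fun acc jc => acc ++ (PySem.Dict.getD pvNewChrs jc.2 "").toList) []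

def expand_warehouse (m : List String) : List String × (Int × Int) :=
  let new_m0 := (PySem.List.enumerate m).foldl (fun acc ir => acc ++ [pvBuildRow ir.2]) ([] : List (List Char))
  let new_m := new_m0.map (fun x => String.ofList x)          -- ''.join(x)
  let start := (PySem.List.enumerate new_m).foldl
    (fun st ir =>
      (PySem.List.enumerate ir.2.toList).foldl
        (fun st2 jc => if jc.2 = '@' then some (ir.1, jc.1) else st2) st)
    (none : Option (Int × Int))
  match start with
  | some p => (new_m, p)
  | none => (new_m, (0, 0))   -- UnboundLocalError (no '@' anywhere) is excluded by Pre_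

-- ===== PORT B =====
-- ''.join(new_chrs[c] for c in r): concatenation of the per-char pieces
-- (KeyError on a char outside the dict is excluded by Pre_)
def pvExpandRow (r : String) : String :=
  String.ofList (r.toList.flatMap (fun c => (PySem.Dict.getD pvNewChrs c "").toList))

-- the reversed(list(enumerate(m))) loop with its early return
def pvFindLoop : List (Int × String) → Option (Int × Int)
  | [] => none
  | (i, r) :: rest =>
      let j := PySem.Str.rfind r "@"
      if j ≠ -1 then some (i, 2 * j) else pvFindLoop rest

def expand_warehouse_alt (m : List String) : List String × (Int × Int) :=
  let new_m := m.map pvExpandRow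
  match pvFindLoop (PySem.List.enumerate m).reverse with
  | some p => (new_m, p)
  | none => (new_m, (0, 0))   -- Python B raises ValueError here; excluded by Pre_

-- ===== PRECONDITION & SPEC =====
-- Pre_ admits exactly the inputs on which A returns: every character is one of '#','O','.','@'
-- (otherwise A raises KeyError) and some row contains '@' (otherwise A raises UnboundLocalError).
def Pre_expand_warehouse (m : List String) : Prop :=
  (m.all fun r => r.toList.all fun c => c = '#' || c = 'O' || c = '.' || c = '@') = true ∧
  (m.any fun r => r.toList.contains '@') = true
instance (m : List String) : Decidable (Pre_expand_warehouse m) := by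
  unfold Pre_expand_warehouse; infer_instance

def pvWitness_expand_warehouse : List String := ["#O.@", "...."]

def Spec_expand_warehouse (m : List String) (out : List String × (Int × Int)) : Prop := out = expand_warehouse_alt m
instance (m : List String) (out : List String × (Int × Int)) : Decidable (Spec_expand_warehouse m out) := by unfold Spec_expand_warehouse; infer_instance

-- ===== CLAIM (what is proved, stated in full; the proofs are below) =====
def Claim_equal_expand_warehouse : Prop := ∀ (m : List String), Dom_expand_warehouse m → Pre_expand_warehouse m → Spec_expand_warehouse m (expand_warehouse m)

-- ===== LEMMAS AND PROOFS =====

-- last index of '@' in a list of chars (none if absent)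
def pvLastAt? : List Char → Option Nat
  | [] => none
  | c :: t =>
    match pvLastAt? t with
    | some j => some (j + 1)
    | none => if c = '@' then some 0 else none

-- chars admitted by Pre_
def pvInK (c : Char) : Bool := c = '#' || c = 'O' || c = '.' || c = '@'

-- closed form of the per-char expansion on admitted chars (proof-side only)
def pvTrans (c : Char) : List Char :=
  if c = '#' then ['#', '#'] else if c = 'O' then ['[', ']']
  else if c = '.' then ['.', '.'] else if c = '@' then ['@', '.'] else [c]

theorem pvChr_eq (c : Char) (h : pvInK c = true) :
    (PySem.Dict.getD pvNewChrs c "").toList = pvTrans c := by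
  have : c = '#' ∨ c = 'O' ∨ c = '.' ∨ c = '@' := by
    simp [pvInK] at h; tauto
  rcases this with h | h | h | h <;> subst h <;> decide

theorem pvFlatMap_congr {a b : Type} (l : List a) (f g : a → List b)
    (h : ∀ c ∈ l, f c = g c) : l.flatMap f = l.flatMap g := by
  induction l with
  | nil => rfl
  | cons x t ih =>
    simp only [List.flatMap_cons, h x (List.mem_cons_self), ih (fun c hc => h c (List.mem_cons_of_mem x hc))]

theorem pvExpandRow_eq (r : String) (h : r.toList.all pvInK = true) :
    (pvExpandRow r).toList = r.toList.flatMap pvTrans := by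
  simp only [pvExpandRow, String.toList_ofList]
  apply pvFlatMap_congr
  intro c hc
  exact pvChr_eq c (by rw [List.all_eq_true] at h; exact h c hc)

theorem pvLastAt?_append (a b : List Char) :
    pvLastAt? (a ++ b) =
      match pvLastAt? b with
      | some k => some (a.length + k)
      | none => pvLastAt? a := by
  induction a with
  | nil => cases h : pvLastAt? b <;> simp [pvLastAt?, h]
  | cons c t ih =>
    simp only [List.cons_append, pvLastAt?, ih]
    cases hb : pvLastAt? b with
    | some k =>
      simp only [List.length_cons]
      exact congrArg some (by omega)
    | none => rfl

theorem pvPrefix_singleton (t : List Char) :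
    (['@'].isPrefixOf t) = (t.head? == some '@') := by
  cases t with
  | nil => rfl
  | cons c r =>
    show ('@' == c && List.isPrefixOf [] r) = _
    simp [BEq.comm]

-- rfind on a single-char needle is the last index
theorem pvRfind_go_spec (j : Nat) (s : List Char) :
    PySem.Chars.rfind.go s ['@'] j =
      match pvLastAt? (s.take (j + 1)) with
      | some k => (k : Int)
      | none => -1 := by
  induction j with
  | zero =>
    show (if ['@'].isPrefixOf s then (0 : Int) else -1) = _
    cases s with
    | nil => rfl
    | cons c r =>
      rw [pvPrefix_singleton]
      by_cases hc : c = '@' <;> simp [hc, pvLastAt?, List.take_succ]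
  | succ j ih =>
    show (if ['@'].isPrefixOf (s.drop (j + 1)) then ((j + 1 : Nat) : Int) else PySem.Chars.rfind.go s ['@'] j) = _
    rw [pvPrefix_singleton, List.head?_drop, ih]
    rw [show s.take (j + 1 + 1) = s.take (j + 1) ++ s[j + 1]?.toList from List.take_succ]
    cases hg : s[j + 1]? with
    | none => simp [hg]
    | some c =>
      have hlen : (s.take (j + 1)).length = j + 1 := by
        obtain ⟨hlt, -⟩ := List.getElem?_eq_some_iff.mp hg
        simp [List.length_take]; omega
      by_cases hc : c = '@' <;>
        simp [hg, hc, pvLastAt?_append, pvLastAt?, hlen] <;>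
        cases ht : pvLastAt? (s.take (j + 1)) <;> simp [ht]

theorem pvRfind_spec (s : List Char) :
    PySem.Chars.rfind s ['@'] =
      match pvLastAt? s with
      | some k => (k : Int)
      | none => -1 := by
  show PySem.Chars.rfind.go s ['@'] s.length = _
  rw [pvRfind_go_spec]
  rw [List.take_of_length_le (by omega)]

-- A's enumerate/append fold builds the same char list as B's join of pieces
theorem pvBuildRow_eq (r : String) :
    pvBuildRow r = r.toList.flatMap (fun c => (PySem.Dict.getD pvNewChrs c "").toList) := by
  have fold : ∀ (l : List Char) (k : Int) (acc : List Char),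
      (PySem.List.enumerate l k).foldl
          (fun acc jc => acc ++ (PySem.Dict.getD pvNewChrs jc.2 "").toList) acc =
        acc ++ l.flatMap (fun c => (PySem.Dict.getD pvNewChrs c "").toList) := by
    intro l
    induction l with
    | nil => intro k acc; simp [PySem.List.enumerate_nil]
    | cons c t ih => intro k acc; simp [PySem.List.enumerate_cons, ih]
  unfold pvBuildRow
  rw [fold]
  simp only [List.nil_append]

-- last '@' of an expanded row sits at twice the last '@' of the row
theorem pvLastAt?_flatMap (s : List Char) (h : s.all pvInK = true) :
    pvLastAt? (s.flatMap pvTrans) = (pvLastAt? s).map (fun k => 2 * k) := by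
  induction s with
  | nil => rfl
  | cons c t ih =>
    simp only [List.all_cons, Bool.and_eq_true] at h
    have ihe := ih h.2
    have hc : c = '#' ∨ c = 'O' ∨ c = '.' ∨ c = '@' := by
      have := h.1; simp [pvInK] at this; tauto
    have key : pvLastAt? (pvTrans c) = if c = '@' then some 0 else none := by
      rcases hc with h | h | h | h <;> subst h <;> decide
    have hlen : (pvTrans c).length = 2 := by
      rcases hc with h | h | h | h <;> subst h <;> decide
    rw [List.flatMap_cons, pvLastAt?_append, ihe, key, hlen]
    show _ = (pvLastAt? (c :: t)).map (fun k => 2 * k)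
    cases ht : pvLastAt? t <;> by_cases hc2 : c = '@' <;>
      simp [pvLastAt?, ht, hc2] <;> omega

-- the common specification of the '@' search, rows scanned from index i
def pvSpecRows : Int → List String → Option (Int × Int)
  | _, [] => none
  | i, r :: t =>
    match pvSpecRows (i + 1) t with
    | some p => some p
    | none => (pvLastAt? r.toList).map (fun k => (i, (2 * k : Int)))

theorem pvInner_eq (i : Int) (s : List Char) (k : Int) (st : Option (Int × Int)) :
    (PySem.List.enumerate s k).foldl
        (fun st2 jc => if jc.2 = '@' then some (i, jc.1) else st2) st =
      match pvLastAt? s with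
      | some j => some (i, k + j)
      | none => st := by
  induction s generalizing k st with
  | nil => simp [PySem.List.enumerate_nil, pvLastAt?]
  | cons c t ih =>
    rw [PySem.List.enumerate_cons, List.foldl_cons, ih]
    show _ = (match pvLastAt? (c :: t) with
      | some j => some (i, k + (j : Int))
      | none => st)
    cases ht : pvLastAt? t <;> by_cases hc : c = '@' <;>
      simp [pvLastAt?, ht, hc] <;> push_cast <;> ring_nf

theorem pvOuter_eq (m : List String) (h : (m.all fun r => r.toList.all pvInK) = true)
    (i : Int) (st : Option (Int × Int)) :
    (PySem.List.enumerate (m.map pvExpandRow) i).foldl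
        (fun st ir =>
          (PySem.List.enumerate ir.2.toList).foldl
            (fun st2 jc => if jc.2 = '@' then some (ir.1, jc.1) else st2) st) st =
      match pvSpecRows i m with
      | some p => some p
      | none => st := by
  induction m generalizing i st with
  | nil => simp [PySem.List.enumerate_nil, pvSpecRows]
  | cons r t ih =>
    simp only [List.all_cons, Bool.and_eq_true] at h
    simp only [List.map_cons, PySem.List.enumerate_cons, List.foldl_cons]
    rw [ih h.2]
    rw [pvExpandRow_eq r h.1]
    rw [pvInner_eq, pvLastAt?_flatMap r.toList h.1]
    show _ = (match pvSpecRows i (r :: t) with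
      | some p => some p
      | none => st)
    show _ = (match (match pvSpecRows (i + 1) t with
      | some p => some p
      | none => (pvLastAt? r.toList).map (fun k => (i, (2 * k : Int)))) with
      | some p => some p
      | none => st)
    cases hs : pvSpecRows (i + 1) t <;> cases ht : pvLastAt? r.toList <;>
      simp [hs, ht] <;> push_cast <;> ring_nf

theorem pvFindLoop_append (a b : List (Int × String)) :
    pvFindLoop (a ++ b) =
      match pvFindLoop a with
      | some p => some p
      | none => pvFindLoop b := by
  induction a with
  | nil => simp [pvFindLoop]
  | cons x t ih =>
    obtain ⟨i, r⟩ := x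
    rw [List.cons_append,
      show pvFindLoop ((i, r) :: (t ++ b)) =
        if PySem.Str.rfind r "@" ≠ -1 then some (i, 2 * PySem.Str.rfind r "@")
        else pvFindLoop (t ++ b) from rfl,
      show pvFindLoop ((i, r) :: t) =
        if PySem.Str.rfind r "@" ≠ -1 then some (i, 2 * PySem.Str.rfind r "@")
        else pvFindLoop t from rfl]
    split_ifs with hj
    · rfl
    · exact ih

theorem pvFindLoop_eq (m : List String) (i : Int) :
    pvFindLoop (PySem.List.enumerate m i).reverse = pvSpecRows i m := by
  induction m generalizing i with
  | nil => simp [PySem.List.enumerate_nil, pvFindLoop, pvSpecRows]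
  | cons r t ih =>
    rw [PySem.List.enumerate_cons, List.reverse_cons, pvFindLoop_append, ih]
    have hr : PySem.Str.rfind r "@" =
        match pvLastAt? r.toList with
        | some k => (k : Int)
        | none => -1 := by
      rw [PySem.Str.rfind_eq]
      rw [show "@".toList = ['@'] from rfl]
      exact pvRfind_spec r.toList
    show _ = pvSpecRows i (r :: t)
    show _ = (match pvSpecRows (i + 1) t with
      | some p => some p
      | none => (pvLastAt? r.toList).map (fun k => (i, (2 * k : Int))))
    cases hs : pvSpecRows (i + 1) t with
    | some p => simp [hs]
    | none =>
      simp only [hs]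
      show (let j := PySem.Str.rfind r "@"; if j ≠ -1 then some (i, 2 * j) else pvFindLoop []) = _
      rw [hr]
      cases ht : pvLastAt? r.toList <;> simp [pvFindLoop]

theorem pvBuild_list_eq (m : List String) (i : Int) (acc : List (List Char)) :
    (PySem.List.enumerate m i).foldl (fun acc ir => acc ++ [pvBuildRow ir.2]) acc =
      acc ++ m.map pvBuildRow := by
  induction m generalizing i acc with
  | nil => simp [PySem.List.enumerate_nil]
  | cons r t ih => simp [PySem.List.enumerate_cons, ih]

-- ===== VERDICT (by name: the statement is the Claim_ definition above) =====
theorem expand_warehouse_spec : Claim_equal_expand_warehouse := by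
  intro m _ hPre
  obtain ⟨hK, _⟩ := hPre
  have hK' : (m.all fun r => r.toList.all pvInK) = true := hK
  unfold Spec_expand_warehouse expand_warehouse expand_warehouse_alt
  have hmap : ((PySem.List.enumerate m).foldl (fun acc ir => acc ++ [pvBuildRow ir.2])
        ([] : List (List Char))).map (fun x => String.ofList x) = m.map pvExpandRow := by
    rw [pvBuild_list_eq, List.nil_append, List.map_map]
    apply List.map_congr_left
    intro r hr
    simp [Function.comp, pvBuildRow_eq r, pvExpandRow]
  simp only [hmap]
  rw [pvOuter_eq m hK' 0 none, pvFindLoop_eq]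
  cases hs : pvSpecRows 0 m <;> rfl
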